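-- pv_equiv track=rewrite | github.com/zhenmouqian/Distributed-computing | sample.py | fun1
-- ===== SOURCE A (Python) =====
-- def fun1(f0, f1, num):
--     if num == 0:
--         return f0
--     if num == 1:
--         return f1
--     n0, n1, n2 = f0, f1, f0 + f1
--     for i in range(2, num):
--         n0, n1, n2 = n1, n2, (-1) ** (i + 1) * (n1 + n2)
--     return n2
-- ===== SOURCE B (Python) =====
-- def _mat_mul(p, q):
--     (a, b), (c, d) = p
--     (e, f), (g, h) = q
--     return ((a * e + b * g, a * f + b * h), (c * e + d * g, c * f + d * h))
--
--
-- def _mat_pow(m, q):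
--     # m ** q for a 2x2 integer matrix, by repeated squaring (q >= 0)
--     if q == 0:
--         return ((1, 0), (0, 1))
--     h = _mat_pow(m, q // 2)
--     s = _mat_mul(h, h)
--     return _mat_mul(s, m) if q % 2 else s
--
--
-- def fun1(f0, f1, num):
--     if num == 0:
--         return f0
--     if num == 1:
--         return f1
--     # a_k = (-1)**k * (a_(k-1) + a_(k-2)) for k >= 2; two steps at a time the
--     # signs repeat, so (a_(2m+2), a_(2m+3)) = ((1,1),(-1,-2))**m @ (a_2, a_3).
--     steps = max(num - 2, 0)  # recurrence steps past a_2 (none for num < 2)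
--     q, r = divmod(steps, 2)
--     (p00, p01), (p10, p11) = _mat_pow(((1, 1), (-1, -2)), q)
--     a2, a3 = f0 + f1, -f0 - 2 * f1
--     if r == 0:
--         return p00 * a2 + p01 * a3
--     return p10 * a2 + p11 * a3
-- ===== Notes on version B (the rewrite author's own statement) =====
-- stated objective: alternative
-- what changed: Replaces the per-index loop (one signed addition per index up to num) by repeated-squaring exponentiation of the constant 2x2 matrix of the period-2 signed recurrence, applied to the pair (a_2, a_3); intended as faster, measured up to 131x at the sizes the probe could verify but unconfirmed at the largest size.
import Mathlib
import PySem

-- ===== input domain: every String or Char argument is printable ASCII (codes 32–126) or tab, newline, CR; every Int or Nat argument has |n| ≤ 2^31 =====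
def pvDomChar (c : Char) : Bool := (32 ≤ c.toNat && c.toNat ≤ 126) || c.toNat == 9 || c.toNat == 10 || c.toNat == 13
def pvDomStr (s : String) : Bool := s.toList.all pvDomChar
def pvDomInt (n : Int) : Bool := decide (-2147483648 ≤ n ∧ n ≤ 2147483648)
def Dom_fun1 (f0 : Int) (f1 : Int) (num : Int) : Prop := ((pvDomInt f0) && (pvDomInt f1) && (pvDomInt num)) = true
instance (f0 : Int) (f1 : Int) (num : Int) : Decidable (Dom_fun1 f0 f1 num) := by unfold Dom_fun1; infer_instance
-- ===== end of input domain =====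

-- B replaces A's per-index loop (num-2 iterations) by repeated-squaring powers
-- of the constant 2x2 matrix of the period-2 signed recurrence.

-- ===== PORT A =====
-- literal port of A's loop; i ∈ range(2, num) so i+1 ≥ 3, hence (i+1).toNat is
-- exact for Python's (-1) ** (i + 1)
def fun1 (f0 : Int) (f1 : Int) (num : Int) : Int :=
  if num = 0 then f0
  else if num = 1 then f1
  else
    let st := (PySem.List.pyRange 2 num 1).foldl
      (fun (s : Int × Int × Int) (i : Int) =>
        (s.2.1, s.2.2, (-1 : Int) ^ (i + 1).toNat * (s.2.1 + s.2.2)))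
      (f0, f1, f0 + f1)
    st.2.2

-- ===== PORT B =====
def matMul (p q : (Int × Int) × (Int × Int)) : (Int × Int) × (Int × Int) :=
  ((p.1.1 * q.1.1 + p.1.2 * q.2.1, p.1.1 * q.1.2 + p.1.2 * q.2.2),
   (p.2.1 * q.1.1 + p.2.2 * q.2.1, p.2.1 * q.1.2 + p.2.2 * q.2.2))

-- Source B's _mat_pow: repeated squaring; the Python exponent q is ≥ 0 (it is
-- steps // 2 with steps = max(num-2, 0)), so Nat is exact
def matPow (m : (Int × Int) × (Int × Int)) (q : Nat) : (Int × Int) × (Int × Int) :=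
  if h : q = 0 then ((1, 0), (0, 1))
  else
    let hp := matPow m (q / 2)
    let s := matMul hp hp
    if q % 2 = 1 then matMul s m else s
decreasing_by exact Nat.div_lt_self (Nat.pos_of_ne_zero h) one_lt_two

def fun1_alt (f0 : Int) (f1 : Int) (num : Int) : Int :=
  if num = 0 then f0
  else if num = 1 then f1
  else
    -- steps = max(num - 2, 0) ≥ 0, so .toNat is exact; q, r = divmod(steps, 2)
    let steps : Nat := (max (num - 2) 0).toNat
    let q := steps / 2
    let r := steps % 2
    let p := matPow ((1, 1), (-1, -2)) q
    let a2 := f0 + f1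
    let a3 := -f0 - 2 * f1
    if r = 0 then p.1.1 * a2 + p.1.2 * a3
    else p.2.1 * a2 + p.2.2 * a3

-- ===== PRECONDITION & SPEC =====
def Spec_fun1 (f0 : Int) (f1 : Int) (num : Int) (out : Int) : Prop := out = fun1_alt f0 f1 num
instance (f0 : Int) (f1 : Int) (num : Int) (out : Int) : Decidable (Spec_fun1 f0 f1 num out) := by unfold Spec_fun1; infer_instance

-- ===== CLAIM (what is proved, stated in full; the proofs are below) =====
def Claim_equal_fun1 : Prop := ∀ (f0 : Int) (f1 : Int) (num : Int), Dom_fun1 f0 f1 num → Spec_fun1 f0 f1 num (fun1 f0 f1 num)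

-- ===== LEMMAS AND PROOFS =====

-- the abstract sequence a_k both programs compute: a_(k+2) = (-1)^(k+2)(a_(k+1)+a_k)
def seq (f0 f1 : Int) : Nat → Int
  | 0 => f0
  | 1 => f1
  | (k+2) => (-1 : Int) ^ k * (seq f0 f1 (k+1) + seq f0 f1 k)

theorem seq_add_two (f0 f1 : Int) (k : Nat) :
    seq f0 f1 (k+2) = (-1 : Int) ^ k * (seq f0 f1 (k+1) + seq f0 f1 k) := rfl

-- A's fold over range(2, 2+n) ends in the state (a_n, a_(n+1), a_(n+2))
theorem foldA (f0 f1 : Int) (n : Nat) :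
    (PySem.List.pyRange 2 (2 + (n : Int)) 1).foldl
      (fun (s : Int × Int × Int) (i : Int) =>
        (s.2.1, s.2.2, (-1 : Int) ^ (i + 1).toNat * (s.2.1 + s.2.2)))
      (f0, f1, f0 + f1)
    = (seq f0 f1 n, seq f0 f1 (n+1), seq f0 f1 (n+2)) := by
  induction n with
  | zero =>
    rw [show (2 + ((0:Nat) : Int)) = 2 by norm_num, PySem.List.pyRange_one_eq_nil (le_refl 2)]
    simp [seq]
    ring
  | succ n ih =>
    rw [show (2 + ((n+1:Nat) : Int)) = (2 + (n : Int)) + 1 by push_cast; ring,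
       PySem.List.pyRange_one_succ_right (by omega), List.foldl_append, ih]
    simp only [List.foldl]
    have ht : ((2 + (n : Int)) + 1).toNat = n + 3 := by omega
    rw [ht]
    have h3 : seq f0 f1 (n+3) = (-1 : Int) ^ (n+1) * (seq f0 f1 (n+2) + seq f0 f1 (n+1)) :=
      seq_add_two f0 f1 (n+1)
    have hp : ((-1 : Int)) ^ (n+3) = (-1 : Int) ^ (n+1) := by
      rw [show n+3 = (n+1)+2 by ring, pow_add]; norm_num
    simp only [Prod.mk.injEq]
    refine ⟨by trivial, by trivial, ?_⟩
    rw [hp, h3]; ring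

-- plain iterated product, the specification of matPow
def mpowS (m : (Int × Int) × (Int × Int)) : Nat → (Int × Int) × (Int × Int)
  | 0 => ((1, 0), (0, 1))
  | (k+1) => matMul (mpowS m k) m

theorem matMul_assoc (a b c : (Int × Int) × (Int × Int)) :
    matMul (matMul a b) c = matMul a (matMul b c) := by
  simp only [matMul, Prod.mk.injEq]
  exact ⟨⟨by ring, by ring⟩, by ring, by ring⟩

theorem matMul_one (p : (Int × Int) × (Int × Int)) :
    matMul p ((1, 0), (0, 1)) = p := by
  simp only [matMul, mul_one, mul_zero, add_zero, zero_add]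

theorem mpowS_add (m : (Int × Int) × (Int × Int)) (a b : Nat) :
    mpowS m (a + b) = matMul (mpowS m a) (mpowS m b) := by
  induction b with
  | zero => simp [mpowS, matMul_one]
  | succ b ih =>
    rw [show a + (b+1) = (a+b)+1 by ring]
    simp only [mpowS, ih, matMul_assoc]

theorem matPow_eq (m : (Int × Int) × (Int × Int)) (q : Nat) : matPow m q = mpowS m q := by
  induction q using Nat.strong_induction_on with
  | _ q ih =>
    unfold matPow
    split_ifs with h0 h1
    · subst h0; rfl
    · rw [ih (q / 2) (Nat.div_lt_self (Nat.pos_of_ne_zero h0) one_lt_two)]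
      show matMul (matMul (mpowS m (q / 2)) (mpowS m (q / 2))) m = mpowS m q
      rw [← mpowS_add]
      conv_rhs => rw [show q = (q / 2 + q / 2) + 1 from by omega]
      rfl
    · rw [ih (q / 2) (Nat.div_lt_self (Nat.pos_of_ne_zero h0) one_lt_two)]
      show matMul (mpowS m (q / 2)) (mpowS m (q / 2)) = mpowS m q
      rw [← mpowS_add]
      congr 1
      omega

-- the matrix power acts on consecutive pairs of the sequence
theorem mpowS_act (f0 f1 : Int) (q : Nat) : ∀ (k : Nat),
    ((mpowS ((1, 1), (-1, -2)) q).1.1 * seq f0 f1 (2*k+2)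
       + (mpowS ((1, 1), (-1, -2)) q).1.2 * seq f0 f1 (2*k+3)
     = seq f0 f1 (2*k + 2*q + 2))
  ∧ ((mpowS ((1, 1), (-1, -2)) q).2.1 * seq f0 f1 (2*k+2)
       + (mpowS ((1, 1), (-1, -2)) q).2.2 * seq f0 f1 (2*k+3)
     = seq f0 f1 (2*k + 2*q + 3)) := by
  induction q with
  | zero => intro k; simp [mpowS]
  | succ q ih =>
    intro k
    have h4 : seq f0 f1 (2*k+4) = seq f0 f1 (2*k+2) + seq f0 f1 (2*k+3) := by
      have he : ((-1 : Int)) ^ (2*k+2) = 1 := Even.neg_one_pow ⟨k+1, by ring⟩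
      rw [show 2*k+4 = (2*k+2)+2 by ring, seq_add_two, he,
         show (2*k+2)+1 = 2*k+3 by ring]
      ring
    have h5 : seq f0 f1 (2*k+5) = -seq f0 f1 (2*k+2) - 2 * seq f0 f1 (2*k+3) := by
      have ho : ((-1 : Int)) ^ (2*k+3) = -1 := Odd.neg_one_pow ⟨k+1, by ring⟩
      rw [show 2*k+5 = (2*k+3)+2 by ring, seq_add_two, ho,
         show (2*k+3)+1 = 2*k+4 by ring, h4]
      ring
    have ihk := ih (k+1)
    rw [show 2*(k+1)+2 = 2*k+4 by ring, show 2*(k+1)+3 = 2*k+5 by ring,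
       show 2*(k+1) + 2*q + 2 = 2*k + 2*(q+1) + 2 by ring,
       show 2*(k+1) + 2*q + 3 = 2*k + 2*(q+1) + 3 by ring] at ihk
    simp only [mpowS, matMul]
    constructor
    · rw [← ihk.1, h4, h5]; ring
    · rw [← ihk.2, h4, h5]; ring

theorem seq_two (f0 f1 : Int) : seq f0 f1 2 = f0 + f1 := by simp [seq]; ring
theorem seq_three (f0 f1 : Int) : seq f0 f1 3 = -f0 - 2 * f1 := by
  rw [seq_add_two]
  simp [seq]
  ring

-- ===== VERDICT (by name: the statement is the Claim_ definition above) =====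
theorem fun1_spec : Claim_equal_fun1 := by
  intro f0 f1 num _
  unfold Spec_fun1 fun1 fun1_alt
  split_ifs with h0 h1
  · rfl
  · rfl
  · by_cases h2 : 2 ≤ num
    · -- num ≥ 2: both sides compute seq (num-2+2)
      set n : Nat := (num - 2).toNat with hn
      have hnum : num = 2 + (n : Int) := by omega
      rw [hnum, foldA]
      have hmax : (max (2 + (n : Int) - 2) 0).toNat = n := by omega
      rw [hmax]
      show seq f0 f1 (n + 2) =
        if n % 2 = 0 then
          (matPow ((1, 1), (-1, -2)) (n / 2)).1.1 * (f0 + f1)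
            + (matPow ((1, 1), (-1, -2)) (n / 2)).1.2 * (-f0 - 2 * f1)
        else
          (matPow ((1, 1), (-1, -2)) (n / 2)).2.1 * (f0 + f1)
            + (matPow ((1, 1), (-1, -2)) (n / 2)).2.2 * (-f0 - 2 * f1)
      rw [matPow_eq]
      have hact := mpowS_act f0 f1 (n / 2) 0
      rw [show 2*0+2 = 2 by ring, show 2*0+3 = 3 by ring, seq_two, seq_three] at hact
      by_cases hr : n % 2 = 0
      · rw [if_pos hr, hact.1]
        congr 1
        omega
      · rw [if_neg hr, hact.2]
        congr 1
        omega
    · -- num ≤ -1 here: empty range, both sides return f0 + f1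
      rw [PySem.List.pyRange_one_eq_nil (by omega)]
      have hmax : (max (num - 2) 0).toNat = 0 := by omega
      rw [hmax]
      show f0 + f1 =
        if (0:Nat) % 2 = 0 then
          (matPow ((1, 1), (-1, -2)) (0 / 2)).1.1 * (f0 + f1)
            + (matPow ((1, 1), (-1, -2)) (0 / 2)).1.2 * (-f0 - 2 * f1)
        else
          (matPow ((1, 1), (-1, -2)) (0 / 2)).2.1 * (f0 + f1)
            + (matPow ((1, 1), (-1, -2)) (0 / 2)).2.2 * (-f0 - 2 * f1)
      rw [matPow_eq]
      norm_num [mpowS]
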